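-- pv_equiv track=rewrite | github.com/XJBGroup/boj-v6 | scripts/render.py | get_doc
-- ===== SOURCE A (Python) =====
-- import bisect
--
-- def get_doc(tmpl, finding):
--     finding_l = [0] * len(finding)
--     for i, f in enumerate(finding):
--         finding_l[i] = tmpl.find(f)
--
--     search_list = list(sorted(finding_l + [len(tmpl)]))
--
--     for i, f in enumerate(finding_l):
--         finding_r = search_list[bisect.bisect_right(search_list, f)]
--         finding[i] = tmpl[finding_l[i] + len(finding[i]): finding_r]
--     return finding
-- ===== SOURCE B (Python) =====
-- def get_doc(tmpl, finding):
--     n = len(tmpl)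
--     finding_l = [tmpl.find(f) for f in finding]
--     for i, f in enumerate(finding_l):
--         r = n
--         for x in finding_l:
--             if f < x < r:
--                 r = x
--         finding[i] = tmpl[f + len(finding[i]): r]
--     return finding
-- ===== Notes on version B (the rewrite author's own statement) =====
-- stated objective: simpler
-- what changed: Replaced the sorted(search_list)+bisect_right lookup of the next-greater position by a plain inner minimum scan over finding_l with len(tmpl) as initial bound; no sorting, no bisect, no extra list.
import Mathlib
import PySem

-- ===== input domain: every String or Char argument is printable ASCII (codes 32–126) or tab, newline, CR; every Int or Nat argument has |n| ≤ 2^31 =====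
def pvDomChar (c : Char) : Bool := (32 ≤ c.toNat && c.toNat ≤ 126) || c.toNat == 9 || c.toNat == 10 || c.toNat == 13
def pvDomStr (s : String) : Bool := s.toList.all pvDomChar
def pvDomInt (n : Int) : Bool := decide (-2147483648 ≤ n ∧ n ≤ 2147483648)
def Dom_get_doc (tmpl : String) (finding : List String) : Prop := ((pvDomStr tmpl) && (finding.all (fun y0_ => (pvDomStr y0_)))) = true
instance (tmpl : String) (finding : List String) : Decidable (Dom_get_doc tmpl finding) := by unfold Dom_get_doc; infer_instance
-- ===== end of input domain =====

-- B replaces A's sort+bisect next-greater-position lookup by a direct minimum scan (objective: simpler).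
-- Both Pythons mutate `finding` in place identically; the equivalence proved here is about the return value.


-- ===== PORT A =====
def get_doc (tmpl : String) (finding : List String) : List String :=
  -- finding_l = [0]*len(finding); for i, f in enumerate(finding): finding_l[i] = tmpl.find(f)
  let finding_l := (PySem.List.enumerate finding).foldl
    (fun fl (p : Int × String) => PySem.List.pySetD fl p.1 (PySem.Str.find tmpl p.2))
    (List.replicate finding.length (0 : Int))
  -- search_list = list(sorted(finding_l + [len(tmpl)]))
  let search_list := PySem.List.sorted (finding_l ++ [PySem.Str.len tmpl]) (fun x => x)
  -- for i, f in enumerate(finding_l): finding_r = search_list[bisect.bisect_right(search_list, f)];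
  --   finding[i] = tmpl[finding_l[i] + len(finding[i]) : finding_r]
  (PySem.List.enumerate finding_l).foldl
    (fun fs (p : Int × Int) =>
      let finding_r := PySem.List.pyGetD search_list ((PySem.List.bisectRight search_list p.2 : Nat) : Int) 0
      PySem.List.pySetD fs p.1
        (PySem.Str.slice tmpl
          (some (PySem.List.pyGetD finding_l p.1 0 + PySem.Str.len (PySem.List.pyGetD fs p.1 "")))
          (some finding_r)))
    finding

-- ===== PORT B =====
def get_doc_alt (tmpl : String) (finding : List String) : List String :=
  let n := PySem.Str.len tmpl
  let finding_l := finding.map (fun f => PySem.Str.find tmpl f)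
  (PySem.List.enumerate finding_l).foldl
    (fun fs (p : Int × Int) =>
      let r := finding_l.foldl (fun r x => if p.2 < x ∧ x < r then x else r) n
      PySem.List.pySetD fs p.1
        (PySem.Str.slice tmpl
          (some (p.2 + PySem.Str.len (PySem.List.pyGetD fs p.1 "")))
          (some r)))
    finding

-- ===== PRECONDITION & SPEC =====
-- Pre_ excludes exactly the inputs where A raises IndexError: tmpl empty with '' among the findings
-- (there bisect_right indexes one past the end of search_list).
def Pre_get_doc (tmpl : String) (finding : List String) : Prop := ¬ (tmpl = "" ∧ "" ∈ finding)
instance (tmpl : String) (finding : List String) : Decidable (Pre_get_doc tmpl finding) := by unfold Pre_get_doc; infer_instance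
def pvWitness_get_doc : String × List String := ("hello world", ["hello", "world"])

def Spec_get_doc (tmpl : String) (finding : List String) (out : List String) : Prop := out = get_doc_alt tmpl finding
instance (tmpl : String) (finding : List String) (out : List String) : Decidable (Spec_get_doc tmpl finding out) := by unfold Spec_get_doc; infer_instance

-- ===== CLAIM (what is proved, stated in full; the proofs are below) =====
def Claim_equal_get_doc : Prop := ∀ (tmpl : String) (finding : List String), Dom_get_doc tmpl finding → Pre_get_doc tmpl finding → Spec_get_doc tmpl finding (get_doc tmpl finding)
-- ===== LEMMAS AND PROOFS =====

-- A's first loop ('finding_l[i] = tmpl.find(f)' into a preallocated list) produces finding.map find.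
theorem pv_setloop_eq_map {α : Type} (g : α → Int) :
    ∀ (xs : List α) (pre suf : List Int), suf.length = xs.length →
      (PySem.List.enumerate xs (pre.length : Int)).foldl
        (fun fl (p : Int × α) => PySem.List.pySetD fl p.1 (g p.2)) (pre ++ suf)
      = pre ++ xs.map g := by
  intro xs
  induction xs with
  | nil => intro pre suf h; simp at h; simp [h, PySem.List.enumerate]
  | cons x xs ih =>
    intro pre suf h
    cases suf with
    | nil => simp at h
    | cons d suf' =>
      rw [PySem.List.enumerate_cons, List.foldl_cons]
      have h1 : PySem.List.pySetD (pre ++ d :: suf') ((pre.length : Int)) (g x) = (pre ++ [g x]) ++ suf' := by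
        rw [PySem.List.pySetD_natCast]
        rw [List.set_append_right _ _ (le_refl _)]
        simp
      have h2 : ((pre.length : Int) + 1) = (((pre ++ [g x]).length : Int)) := by simp
      rw [h1, h2, ih (pre ++ [g x]) suf' (by simpa using h)]
      simp

-- under Pre_, every computed find-position is strictly below len(tmpl)
theorem pv_find_lt_len (tmpl pat : String) (h : ¬ (tmpl = "" ∧ pat = "")) :
    PySem.Str.find tmpl pat < PySem.Str.len tmpl := by
  rw [PySem.Str.find_eq, PySem.Str.len_eq]
  set s := tmpl.toList with hs
  set sub := pat.toList with hsub
  by_cases hneg : PySem.Chars.find s sub = -1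
  · rw [hneg]
    by_cases hsn : s = []
    · simp [hsn]
    · have : 0 < s.length := List.length_pos_iff.mpr hsn
      omega
  · have hspec := PySem.Chars.findFrom_natCast_spec s sub 0 (Nat.zero_le _)
    norm_num [PySem.Chars.findFrom_zero] at hspec
    obtain ⟨hge, hpre, hmin⟩ := hspec hneg
    have htn := Int.toNat_of_nonneg hge
    have hdl := hpre.length_le
    simp at hdl
    by_cases hpe : sub = []
    · have hzero : (PySem.Chars.find s sub).toNat = 0 := by
        by_contra hnz
        exact hmin 0 (by omega) (by simp [hpe])
      have hsn : s ≠ [] := by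
        intro hs0
        apply h
        constructor
        · have := congrArg String.ofList hs0
          simpa [hs] using this
        · have := congrArg String.ofList hpe
          simpa [hsub] using this
      have : 0 < s.length := List.length_pos_iff.mpr hsn
      omega
    · have : 0 < sub.length := List.length_pos_iff.mpr hpe
      omega

-- B's inner scan computes the least element of L ∪ {a} strictly above f
theorem pv_scan_spec (f : Int) :
    ∀ (L : List Int) (a : Int), f < a →
      f < L.foldl (fun r x => if f < x ∧ x < r then x else r) a ∧
      L.foldl (fun r x => if f < x ∧ x < r then x else r) a ≤ a ∧
      (∀ x ∈ L, f < x → L.foldl (fun r x => if f < x ∧ x < r then x else r) a ≤ x) ∧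
      (L.foldl (fun r x => if f < x ∧ x < r then x else r) a = a ∨
        L.foldl (fun r x => if f < x ∧ x < r then x else r) a ∈ L) := by
  intro L
  induction L with
  | nil => intro a ha; simp [ha]
  | cons x L ih =>
    intro a ha
    rw [List.foldl_cons]
    by_cases hx : f < x ∧ x < a
    · rw [if_pos hx]
      obtain ⟨h1, h2, h3, h4⟩ := ih x hx.1
      refine ⟨h1, by omega, ?_, ?_⟩
      · intro y hy hfy
        rcases List.mem_cons.mp hy with rfl | hyL
        · omega
        · exact h3 y hyL hfy
      · rcases h4 with h | h
        · right; simp [h]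
        · right; exact List.mem_cons_of_mem _ h
    · rw [if_neg hx]
      obtain ⟨h1, h2, h3, h4⟩ := ih a ha
      refine ⟨h1, h2, ?_, ?_⟩
      · intro y hy hfy
        rcases List.mem_cons.mp hy with rfl | hyL
        · omega
        · exact h3 y hyL hfy
      · rcases h4 with h | h
        · left; exact h
        · right; exact List.mem_cons_of_mem _ h

-- A's sorted+bisect boundary equals B's minimum scan (both = least position > f, with len(tmpl) a candidate)
theorem pv_boundary_eq (L : List Int) (n f : Int) (hf : f < n) :
    PySem.List.pyGetD (PySem.List.sorted (L ++ [n]) (fun x => x))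
      ((PySem.List.bisectRight (PySem.List.sorted (L ++ [n]) (fun x => x)) f : Nat) : Int) 0
    = L.foldl (fun r x => if f < x ∧ x < r then x else r) n := by
  set s := PySem.List.sorted (L ++ [n]) (fun x => x) with hsdef
  have hpw : s.Pairwise (fun a b => a ≤ b) := PySem.List.sorted_pairwise (L ++ [n]) (fun x => x)
  obtain ⟨hile, hlt, hgt⟩ := PySem.List.bisectRight_spec s f hpw
  set i := PySem.List.bisectRight s f with hidef
  have hn_mem : n ∈ s := (PySem.List.mem_sorted _ _ _ _).mpr (by simp)
  obtain ⟨jn, hjn, hjneq⟩ := List.mem_iff_getElem.mp hn_mem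
  have hilen : i < s.length := by
    by_contra hge
    have : jn < i := by omega
    have := hlt jn hjn this
    omega
  rw [PySem.List.pyGetD_natCast]
  rw [List.getD_eq_getElem?_getD, List.getElem?_eq_getElem hilen, Option.getD_some]
  have hfi : f < s[i] := hgt i hilen (le_refl _)
  have hmin : ∀ x ∈ s, f < x → s[i] ≤ x := by
    intro x hx hfx
    obtain ⟨j, hj, rfl⟩ := List.mem_iff_getElem.mp hx
    by_cases hji : j < i
    · have := hlt j hj hji; omega
    · exact PySem.List.sorted_id_getElem_mono (L ++ [n]) (by omega) hj
  obtain ⟨g1, g2, g3, g4⟩ := pv_scan_spec f L n hf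
  set r := L.foldl (fun r x => if f < x ∧ x < r then x else r) n with hrdef
  have hr_mem : r ∈ s := by
    rw [PySem.List.mem_sorted]
    rcases g4 with h | h
    · simp [h]
    · simp [h]
  have h1 : s[i] ≤ r := hmin r hr_mem g1
  have h2 : r ≤ s[i] := by
    have hsi_mem : s[i] ∈ L ++ [n] := by
      have : s[i] ∈ s := List.getElem_mem hilen
      rw [PySem.List.mem_sorted] at this; exact this
    rcases List.mem_append.mp hsi_mem with h | h
    · exact g3 _ h hfi
    · simp at h; omega
  omega

-- ===== VERDICT (by name: the statement is the Claim_ definition above) =====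
theorem get_doc_spec : Claim_equal_get_doc := by
  intro tmpl finding _ hpre
  unfold Spec_get_doc get_doc get_doc_alt
  have hfl : (PySem.List.enumerate finding).foldl
      (fun fl (p : Int × String) => PySem.List.pySetD fl p.1 (PySem.Str.find tmpl p.2))
      (List.replicate finding.length (0 : Int))
      = finding.map (fun f => PySem.Str.find tmpl f) := by
    have := pv_setloop_eq_map (fun f => PySem.Str.find tmpl f) finding []
      (List.replicate finding.length (0 : Int)) (by simp)
    simpa using this
  simp only [hfl]
  set fl := finding.map (fun f => PySem.Str.find tmpl f) with hfldef
  apply PySem.List.foldl_congr_mem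
  intro fs p hp
  obtain ⟨k, hk, rfl⟩ := (PySem.List.mem_enumerate_iff fl 0 p).mp hp
  simp only [zero_add]
  have hmem : fl[k] ∈ fl := List.getElem_mem hk
  have hmem' : fl[k] ∈ finding.map (fun f => PySem.Str.find tmpl f) := by
    rw [← hfldef]; exact hmem
  obtain ⟨pat, hpat_mem, hpat_eq⟩ := List.mem_map.mp hmem'
  have hpat_eq' : PySem.Str.find tmpl pat = fl[k] := hpat_eq
  have hflt : fl[k] < PySem.Str.len tmpl := by
    rw [← hpat_eq']
    apply pv_find_lt_len
    rintro ⟨ht, hp0⟩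
    exact hpre ⟨ht, hp0 ▸ hpat_mem⟩
  rw [pv_boundary_eq fl (PySem.Str.len tmpl) fl[k] hflt]
  have hgetk : PySem.List.pyGetD fl ((k : Nat) : Int) 0 = fl[k] := by
    rw [PySem.List.pyGetD_natCast]
    exact List.getD_eq_getElem fl 0 hk
  rw [hgetk]
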